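-- pv_equiv track=rewrite | github.com/toilahoang04/MazeGeneratingAndSolving | dfs.py | dfs
-- ===== SOURCE A (Python) =====
-- import copy
--
-- directions = [(-1, 0), (1, 0), (0, -1), (0, 1)]
--
-- def is_valid(maze, x, y, visited):
--     """ Kiểm tra xem ô (x, y) có hợp lệ không """
--     return 0 <= x < len(maze) and 0 <= y < len(maze[0]) and maze[x][y] != 1  and (x, y) not in visited
--
-- def dfs(AllMaze,maze, start,end, visited, path):
--     """ Hàm DFS để tìm đường đi trong mê cung """
--     # Kiểm tra nếu đã đến điểm kết thúc
--     if start[0] == end[0] and start[1] == end[1] :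
--         path.append((start[0], start[1]))
--         return True
--
--     # Đánh dấu ô (x, y) đã thăm
--     visited.add((start[0], start[1]))
--     path.append((start[0], start[1]))
--     maze[start[0]][start[1]] = 4
--     AllMaze.append(copy.deepcopy(maze))
--
--     # Thử đi theo các hướng
--     for dx, dy in directions:
--         nx, ny = start[0] + dx, start[1] + dy
--         if is_valid(maze, nx, ny, visited):
--             if dfs(AllMaze,maze, (nx,ny),end, visited, path):
--                 return True
--
--     # Nếu không tìm thấy đường đi, quay lại (backtrack)
--     path.pop()
--     return False
-- ===== SOURCE B (Python) =====
-- import copy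
--
-- directions = [(-1, 0), (1, 0), (0, -1), (0, 1)]
--
-- def is_valid(maze, x, y, visited):
--     return 0 <= x < len(maze) and 0 <= y < len(maze[0]) and maze[x][y] != 1 and (x, y) not in visited
--
-- def dfs(AllMaze, maze, start, end, visited, path):
--     """Iterative DFS over an explicit stack of (cell, next-direction-index) frames."""
--     if start[0] == end[0] and start[1] == end[1]:
--         path.append((start[0], start[1]))
--         return True
--
--     def mark(cell):
--         visited.add(cell)
--         path.append(cell)
--         maze[cell[0]][cell[1]] = 4
--         AllMaze.append(copy.deepcopy(maze))
--
--     mark((start[0], start[1]))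
--     stack = [((start[0], start[1]), 0)]
--     while stack:
--         pos, i = stack[-1]
--         found = None
--         while i < 4:
--             dx, dy = directions[i]
--             c = (pos[0] + dx, pos[1] + dy)
--             if is_valid(maze, c[0], c[1], visited):
--                 found = (i, c)
--                 break
--             i += 1
--         if found is None:
--             stack.pop()
--             path.pop()
--         else:
--             j, c = found
--             if c[0] == end[0] and c[1] == end[1]:
--                 path.append(c)
--                 return True
--             mark(c)
--             stack[-1] = (pos, j + 1)
--             stack.append((c, 0))
--     return False
-- ===== Notes on version B (the rewrite author's own statement) =====
-- stated objective: alternative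
-- what changed: The recursive DFS is rewritten as an iterative loop over an explicit stack of (cell, next-direction-index) frames, with the same visit/mark/snapshot/backtrack order, instead of Python call-stack recursion.
-- outside the precondition, e.g. on dfs([], [[1, 1], [1]], (0, 0), (9, 9), set(), []): A returns False, B returns False
import Mathlib
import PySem

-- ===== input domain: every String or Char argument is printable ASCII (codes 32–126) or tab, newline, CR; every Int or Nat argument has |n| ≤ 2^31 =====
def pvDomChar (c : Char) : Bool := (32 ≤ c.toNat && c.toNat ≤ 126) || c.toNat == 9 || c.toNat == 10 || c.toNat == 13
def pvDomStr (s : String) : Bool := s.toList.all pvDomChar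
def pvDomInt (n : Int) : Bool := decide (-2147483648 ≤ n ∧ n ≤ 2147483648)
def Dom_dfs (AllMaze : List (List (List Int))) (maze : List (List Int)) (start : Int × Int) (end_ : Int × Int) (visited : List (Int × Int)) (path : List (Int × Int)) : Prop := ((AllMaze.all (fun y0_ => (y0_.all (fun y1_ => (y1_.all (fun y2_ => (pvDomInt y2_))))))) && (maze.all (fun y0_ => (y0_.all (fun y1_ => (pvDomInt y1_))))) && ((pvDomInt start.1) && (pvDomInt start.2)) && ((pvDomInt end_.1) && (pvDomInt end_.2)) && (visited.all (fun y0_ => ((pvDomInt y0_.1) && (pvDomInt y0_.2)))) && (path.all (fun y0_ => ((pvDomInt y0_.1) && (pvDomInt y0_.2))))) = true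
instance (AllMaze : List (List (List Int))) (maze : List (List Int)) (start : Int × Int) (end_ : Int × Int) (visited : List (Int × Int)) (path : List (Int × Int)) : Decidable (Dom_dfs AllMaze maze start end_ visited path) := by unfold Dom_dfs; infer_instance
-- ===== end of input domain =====

-- B rewrites A's call-stack recursion as an explicit stack of (cell, next-direction-index)
-- frames (objective: alternative). A mutates maze/visited/path/AllMaze in place; the
-- equivalence proved here is about the RETURN value only (B performs the same mutations).

-- ===== PORT A =====
-- shared module-level context of Source A
def pvDirections : List (Int × Int) := [(-1, 0), (1, 0), (0, -1), (0, 1)]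

-- is_valid(maze, x, y, visited); the maze[x][y] read is exact whenever the bounds
-- conjuncts before it hold (Python short-circuits `and`)
def pvIsValid (maze : List (List Int)) (x y : Int) (visited : List (Int × Int)) : Bool :=
  decide (0 ≤ x) && decide (x < (maze.length : Int)) &&
  decide (0 ≤ y) && decide (y < ((maze.headD []).length : Int)) &&
  ((PySem.List.pyGet? ((PySem.List.pyGet? maze x).getD []) y).getD 0) != 1 &&
  !(PySem.Set.contains visited (x, y))

-- maze[x][y] = v (Python wraps negative in-range indices; exact wherever Python returns)
def pvSetCell (m : List (List Int)) (x y v : Int) : List (List Int) :=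
  PySem.List.pySetD m x (PySem.List.pySetD ((PySem.List.pyGet? m x).getD []) y v)

-- the four mutable objects threaded as a record (return-value equivalence is claimed)
structure PvSt where
  allMaze : List (List (List Int))
  maze : List (List Int)
  visited : List (Int × Int)
  path : List (Int × Int)
deriving DecidableEq, Repr

-- Python's recursion has no fuel; the fuel below is scaffolding that provably never
-- runs out on inputs in Pre_ (depth ≤ #unvisited cells + 1), `none` = fuel exhausted.
mutual
def pvDfsA (fuel : Nat) (start end_ : Int × Int) (st : PvSt) : Option (Bool × PvSt) :=
  match fuel with
  | 0 => none
  | f + 1 =>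
    if start.1 = end_.1 ∧ start.2 = end_.2 then
      some (true, { st with path := st.path ++ [(start.1, start.2)] })
    else
      let v' := PySem.Set.add st.visited (start.1, start.2)
      let p' := st.path ++ [(start.1, start.2)]
      let m' := pvSetCell st.maze start.1 start.2 4
      let a' := st.allMaze ++ [m']
      pvTryA f pvDirections start end_ ⟨a', m', v', p'⟩
termination_by (fuel, 0)
def pvTryA (fuel : Nat) (ds : List (Int × Int)) (start end_ : Int × Int) (st : PvSt) : Option (Bool × PvSt) :=
  match ds with
  | [] => some (false, { st with path := st.path.dropLast })
  | d :: ds' =>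
    let n : Int × Int := (start.1 + d.1, start.2 + d.2)
    if pvIsValid st.maze n.1 n.2 st.visited then
      match pvDfsA fuel n end_ st with
      | none => none
      | some (true, st') => some (true, st')
      | some (false, st') => pvTryA fuel ds' start end_ st'
    else
      pvTryA fuel ds' start end_ st
termination_by (fuel, ds.length + 1)
end


def dfs (AllMaze : List (List (List Int))) (maze : List (List Int)) (start : Int × Int) (end_ : Int × Int) (visited : List (Int × Int)) (path : List (Int × Int)) : Bool :=
  ((pvDfsA (maze.length * (maze.headD []).length + 2) start end_ ⟨AllMaze, maze, visited, path⟩).map Prod.fst).getD false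

-- ===== PORT B =====
-- mark(cell): visited.add, path.append, maze write, AllMaze snapshot (as in Source B)
def pvMark (cell : Int × Int) (st : PvSt) : PvSt :=
  let m' := pvSetCell st.maze cell.1 cell.2 4
  ⟨st.allMaze ++ [m'], m', PySem.Set.add st.visited cell, st.path ++ [cell]⟩

-- the inner `while i < 4` scan: first direction index j ≥ i whose neighbour is valid
def pvScanB (maze : List (List Int)) (visited : List (Int × Int)) (pos : Int × Int) (i : Nat) : Option (Nat × (Int × Int)) :=
  match h : pvDirections[i]? with
  | none => none
  | some d =>
    let c : Int × Int := (pos.1 + d.1, pos.2 + d.2)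
    if pvIsValid maze c.1 c.2 visited then some (i, c) else pvScanB maze visited pos (i + 1)
termination_by pvDirections.length - i
decreasing_by
  have : i < pvDirections.length := by
    by_contra hlt
    simp [List.getElem?_eq_none (by omega : pvDirections.length ≤ i)] at h
  omega

-- the outer `while stack` loop (fuel is scaffolding; provably never exhausted on Pre_)
def pvRunB (fuel : Nat) (end_ : Int × Int) (stack : List ((Int × Int) × Nat)) (st : PvSt) : Option (Bool × PvSt) :=
  match stack with
  | [] => some (false, st)
  | (pos, i) :: rest =>
    match fuel with
    | 0 => none
    | f + 1 =>
      match pvScanB st.maze st.visited pos i with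
      | none => pvRunB f end_ rest { st with path := st.path.dropLast }
      | some (j, c) =>
        if c.1 = end_.1 ∧ c.2 = end_.2 then some (true, { st with path := st.path ++ [c] })
        else pvRunB f end_ ((c, 0) :: (pos, j + 1) :: rest) (pvMark c st)

def dfs_alt (AllMaze : List (List (List Int))) (maze : List (List Int)) (start : Int × Int) (end_ : Int × Int) (visited : List (Int × Int)) (path : List (Int × Int)) : Bool :=
  if start.1 = end_.1 ∧ start.2 = end_.2 then true
  else
    let st1 := pvMark (start.1, start.2) ⟨AllMaze, maze, visited, path⟩
    ((pvRunB (2 * (maze.length * (maze.headD []).length) + 4) end_ [((start.1, start.2), 0)] st1).map Prod.fst).getD false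

-- ===== PRECONDITION & SPEC =====
-- Pre_ excludes inputs on which Python A raises IndexError: a start cell outside the
-- (possibly wrapped) index range of the maze when start ≠ end, and ragged mazes with a
-- row shorter than row 0 (whose cells A may read out of range). Being closed-form it is
-- slightly narrower than "A returns": on some short-row ragged mazes A happens to return
-- before touching the short row (see cites).
def Pre_dfs (AllMaze : List (List (List Int))) (maze : List (List Int)) (start : Int × Int) (end_ : Int × Int) (visited : List (Int × Int)) (path : List (Int × Int)) : Prop :=
  (start.1 = end_.1 ∧ start.2 = end_.2) ∨
  ((∀ row ∈ maze, (maze.headD []).length ≤ row.length) ∧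
   -(maze.length : Int) ≤ start.1 ∧ start.1 < (maze.length : Int) ∧
   -((maze.headD []).length : Int) ≤ start.2 ∧ start.2 < ((maze.headD []).length : Int))
instance (AllMaze : List (List (List Int))) (maze : List (List Int)) (start : Int × Int) (end_ : Int × Int) (visited : List (Int × Int)) (path : List (Int × Int)) : Decidable (Pre_dfs AllMaze maze start end_ visited path) := by unfold Pre_dfs; infer_instance

def pvWitness_dfs : List (List (List Int)) × List (List Int) × (Int × Int) × (Int × Int) × (List (Int × Int)) × (List (Int × Int)) :=
  ([], [[0, 0], [0, 0]], (0, 0), (1, 1), [], [])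

def Spec_dfs (AllMaze : List (List (List Int))) (maze : List (List Int)) (start : Int × Int) (end_ : Int × Int) (visited : List (Int × Int)) (path : List (Int × Int)) (out : Bool) : Prop := out = dfs_alt AllMaze maze start end_ visited path
instance (AllMaze : List (List (List Int))) (maze : List (List Int)) (start : Int × Int) (end_ : Int × Int) (visited : List (Int × Int)) (path : List (Int × Int)) (out : Bool) : Decidable (Spec_dfs AllMaze maze start end_ visited path out) := by unfold Spec_dfs; infer_instance

-- ===== CLAIM (what is proved, stated in full; the proofs are below) =====
def Claim_equal_dfs : Prop := ∀ (AllMaze : List (List (List Int))) (maze : List (List Int)) (start : Int × Int) (end_ : Int × Int) (visited : List (Int × Int)) (path : List (Int × Int)), Dom_dfs AllMaze maze start end_ visited path → Pre_dfs AllMaze maze start end_ visited path → Spec_dfs AllMaze maze start end_ visited path (dfs AllMaze maze start end_ visited path)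

-- ===== LEMMAS AND PROOFS =====

-- the in-bounds cells of an R×C grid
def pvCells (R C : Nat) : List (Int × Int) :=
  (List.range R).flatMap (fun x => (List.range C).map (fun y => ((x : Int), (y : Int))))

-- number of grid cells not yet visited (the termination measure)
def pvUnvis (R C : Nat) (v : List (Int × Int)) : Nat :=
  ((pvCells R C).filter (fun c => !PySem.Set.contains v c)).length

-- shape invariant preserved by marking: dimensions R×C, every row at least C long
def pvInv (R C : Nat) (m : List (List Int)) : Prop :=
  m.length = R ∧ (m.headD []).length = C ∧ ∀ row ∈ m, C ≤ row.length

theorem pyIdx_lt {n : Nat} {x : Int} {k : Nat} (h : PySem.List.pyIdx? n x = some k) : k < n := by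
  unfold PySem.List.pyIdx? at h
  split_ifs at h <;> simp_all <;> omega

theorem pv_maplen_setCell (m : List (List Int)) (x y v : Int) :
    (pvSetCell m x y v).map List.length = m.map List.length := by
  have key : ∀ r : List Int, r.length = ((PySem.List.pyGet? m x).getD []).length →
      (PySem.List.pySetD m x r).map List.length = m.map List.length := by
    intro r hr
    unfold PySem.List.pySetD PySem.List.pySet? PySem.List.pyGet? at *
    cases h : PySem.List.pyIdx? m.length x with
    | none => simp
    | some k =>
      have hk : k < m.length := pyIdx_lt h
      simp only [h, Option.map_some, Option.getD_some, List.map_set, Option.bind_eq_bind,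
        Option.bind_some, List.getElem?_eq_getElem hk, Option.getD_some] at hr ⊢
      rw [hr]
      have h2 : (m.map List.length)[k]'(by simpa using hk) = m[k].length := by simp
      rw [← h2, List.set_getElem_self]
  exact key _ (PySem.List.length_pySetD _ _ _)

theorem pv_len_headD (l : List (List Int)) :
    (l.headD []).length = (l.map List.length).headD 0 := by
  cases l <;> simp

theorem pv_mem_cells (R C : Nat) (c : Int × Int) :
    c ∈ pvCells R C ↔ 0 ≤ c.1 ∧ c.1 < (R : Int) ∧ 0 ≤ c.2 ∧ c.2 < (C : Int) := by
  obtain ⟨a, b⟩ := c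
  simp [pvCells]
  constructor
  · rintro ⟨x, hx, y, hy, h⟩
    omega
  · rintro ⟨h1, h2, h3, h4⟩
    exact ⟨⟨a.toNat, by omega, by omega⟩, ⟨b.toNat, by omega, by omega⟩⟩

theorem pv_inv_setCell {R C : Nat} {m : List (List Int)} (h : pvInv R C m) (x y v : Int) :
    pvInv R C (pvSetCell m x y v) := by
  obtain ⟨h1, h2, h3⟩ := h
  have hml := pv_maplen_setCell m x y v
  refine ⟨?_, ?_, ?_⟩
  · have := congrArg List.length hml
    simpa [h1] using this
  · rw [pv_len_headD, hml, ← pv_len_headD, h2]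
  · intro row hrow
    have : row.length ∈ (pvSetCell m x y v).map List.length := List.mem_map_of_mem hrow
    rw [hml] at this
    obtain ⟨row0, hrow0, hlen⟩ := List.mem_map.1 this
    rw [← hlen]
    exact h3 row0 hrow0

theorem pv_valid_mem {R C : Nat} {m : List (List Int)} {x y : Int} {vset : List (Int × Int)}
    (hInv : pvInv R C m) (h : pvIsValid m x y vset = true) :
    (x, y) ∈ pvCells R C ∧ (x, y) ∉ vset := by
  unfold pvIsValid at h
  simp only [Bool.and_eq_true, decide_eq_true_eq, Bool.not_eq_true', bne_iff_ne] at h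
  obtain ⟨⟨⟨⟨⟨hx0, hxR⟩, hy0⟩, hyC⟩, -⟩, hmem⟩ := h
  constructor
  · rw [pv_mem_cells]
    exact ⟨hx0, by rw [← hInv.1]; exact_mod_cast hxR, hy0, by rw [← hInv.2.1]; exact_mod_cast hyC⟩
  · intro hin
    rw [← PySem.Set.contains_iff vset (x, y)] at hin
    rw [hmem] at hin
    cases hin

theorem pv_filter_len_le {α : Type} (p q : α → Bool) (l : List α) (h : ∀ x, q x = true → p x = true) :
    (l.filter q).length ≤ (l.filter p).length := by
  induction l with
  | nil => simp
  | cons a l ih =>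
    simp only [List.filter_cons]
    by_cases hq : q a = true
    · simp [hq, h a hq]; omega
    · by_cases hp : p a = true <;> simp [hq, hp] <;> omega

theorem pv_filter_len_lt {α : Type} (p q : α → Bool) (l : List α) (h : ∀ x, q x = true → p x = true)
    (a : α) (ha : a ∈ l) (hpa : p a = true) (hqa : q a = false) :
    (l.filter q).length < (l.filter p).length := by
  induction l with
  | nil => simp at ha
  | cons b l ih =>
    simp only [List.filter_cons]
    rcases List.mem_cons.1 ha with rfl | hb
    · have := pv_filter_len_le p q l h
      simp [hpa, hqa]; omega
    · have := ih hb
      by_cases hq : q b = true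
      · simp [hq, h b hq]; omega
      · by_cases hp : p b = true <;> simp [hq, hp] <;> omega

theorem pv_contains_add (v : List (Int × Int)) (c x : Int × Int) :
    PySem.Set.contains (PySem.Set.add v c) x = (PySem.Set.contains v x || x == c) := by
  by_cases hx : x ∈ PySem.Set.add v c
  · have := (PySem.Set.mem_add v c x).1 hx
    rcases this with hm | rfl
    · simp [PySem.Set.contains_iff, hx, hm]
    · simp [PySem.Set.contains_iff, hx]
  · have h1 : x ∉ v := fun hm => hx ((PySem.Set.mem_add v c x).2 (Or.inl hm))
    have h2 : x ≠ c := fun he => hx ((PySem.Set.mem_add v c x).2 (Or.inr he))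
    simp [PySem.Set.contains_iff, hx, h1, h2]

theorem pv_unvis_add_lt (R C : Nat) (v : List (Int × Int)) (c : Int × Int)
    (hc : c ∈ pvCells R C) (hv : c ∉ v) :
    pvUnvis R C (PySem.Set.add v c) < pvUnvis R C v := by
  refine pv_filter_len_lt _ _ (pvCells R C) ?_ c hc ?_ ?_
  · intro x hx
    simp only [pv_contains_add, Bool.not_eq_true', Bool.or_eq_false_iff] at hx ⊢
    exact hx.1
  · cases hcon : PySem.Set.contains v c with
    | false => simp [hcon]
    | true => exact absurd ((PySem.Set.contains_iff v c).1 hcon) hv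
  · simp [pv_contains_add]

-- A-side fuel sufficiency (with shape/measure bookkeeping)
theorem pv_suffT : ∀ (fA : Nat) (ds : List (Int × Int)) (pos end_ : Int × Int) (st : PvSt)
    (R C : Nat), pvInv R C st.maze → pvUnvis R C st.visited < fA + 1 →
    ∃ r, pvTryA fA ds pos end_ st = some r ∧ pvInv R C r.2.maze ∧
      pvUnvis R C r.2.visited ≤ pvUnvis R C st.visited := by
  intro fA
  induction fA using Nat.strong_induction_on with
  | _ fA IHf =>
  intro ds
  induction ds with
  | nil =>
    intro pos end_ st R C hInv hu
    exact ⟨(false, { st with path := st.path.dropLast }), by simp [pvTryA], hInv, Nat.le_refl _⟩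
  | cons d ds' IHds =>
    intro pos end_ st R C hInv hu
    cases hval : pvIsValid st.maze (pos.1 + d.1) (pos.2 + d.2) st.visited with
    | false =>
      obtain ⟨r, hr, h1, h2⟩ := IHds pos end_ st R C hInv hu
      exact ⟨r, by simp only [pvTryA, hval, Bool.false_eq_true, if_false]; exact hr, h1, h2⟩
    | true =>
      have hmem := pv_valid_mem hInv hval
      have hu1 : 1 ≤ pvUnvis R C st.visited := by
        have hcf : (pos.1 + d.1, pos.2 + d.2) ∈
            (pvCells R C).filter (fun c => !PySem.Set.contains st.visited c) := by
          refine List.mem_filter.2 ⟨hmem.1, ?_⟩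
          cases hcon : PySem.Set.contains st.visited (pos.1 + d.1, pos.2 + d.2) with
          | false => simp
          | true => exact absurd ((PySem.Set.contains_iff _ _).1 hcon) hmem.2
        have := List.length_pos_of_mem hcf
        exact this
      cases fA with
      | zero => omega
      | succ f =>
        by_cases hend : ((pos.1 + d.1 : Int) = end_.1 ∧ (pos.2 + d.2 : Int) = end_.2)
        · refine ⟨(true, { st with path := st.path ++ [(pos.1 + d.1, pos.2 + d.2)] }), ?_, hInv, Nat.le_refl _⟩
          have hdfs : pvDfsA (f + 1) (pos.1 + d.1, pos.2 + d.2) end_ st =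
              some (true, { st with path := st.path ++ [(pos.1 + d.1, pos.2 + d.2)] }) := by
            simp only [pvDfsA]
            rw [if_pos hend]
          simp only [pvTryA, hval, if_true, hdfs]
        · -- descend: mark the child cell and recurse with one unit of fuel less
          have hInvM : pvInv R C (pvSetCell st.maze (pos.1 + d.1) (pos.2 + d.2) 4) :=
            pv_inv_setCell hInv _ _ _
          have hlt : pvUnvis R C (PySem.Set.add st.visited (pos.1 + d.1, pos.2 + d.2)) <
              pvUnvis R C st.visited := pv_unvis_add_lt R C _ _ hmem.1 hmem.2
          obtain ⟨rc, hrc, hInv', hle'⟩ := IHf f (by omega) pvDirections (pos.1 + d.1, pos.2 + d.2) end_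
            ⟨st.allMaze ++ [pvSetCell st.maze (pos.1 + d.1) (pos.2 + d.2) 4],
             pvSetCell st.maze (pos.1 + d.1) (pos.2 + d.2) 4,
             PySem.Set.add st.visited (pos.1 + d.1, pos.2 + d.2),
             st.path ++ [(pos.1 + d.1, pos.2 + d.2)]⟩ R C hInvM
            (show pvUnvis R C (PySem.Set.add st.visited (pos.1 + d.1, pos.2 + d.2)) < f + 1 by omega)
          have hdfs : pvDfsA (f + 1) (pos.1 + d.1, pos.2 + d.2) end_ st = some rc := by
            simp only [pvDfsA, hend, if_false]
            exact hrc
          obtain ⟨b, st'⟩ := rc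
          have hInv'' : pvInv R C st'.maze := hInv'
          have hleM : pvUnvis R C st'.visited ≤
              pvUnvis R C (PySem.Set.add st.visited (pos.1 + d.1, pos.2 + d.2)) := hle'
          cases b with
          | true =>
            refine ⟨(true, st'), ?_, hInv'',
              (show pvUnvis R C st'.visited ≤ pvUnvis R C st.visited by omega)⟩
            simp only [pvTryA, hval, if_true, hdfs]
          | false =>
            obtain ⟨r, hr, h1, h2⟩ := IHds pos end_ st' R C hInv''
              (show pvUnvis R C st'.visited < f + 1 + 1 by omega)
            refine ⟨r, ?_, h1, by omega⟩
            simp only [pvTryA, hval, if_true, hdfs]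
            exact hr

-- B-side: pvScanB yields a valid direction
theorem pv_scan_valid {m : List (List Int)} {v : List (Int × Int)} {pos : Int × Int} {i j : Nat}
    {c : Int × Int} (h : pvScanB m v pos i = some (j, c)) : pvIsValid m c.1 c.2 v = true := by
  fun_induction pvScanB m v pos i with
  | case1 => simp_all
  | case2 => simp_all
  | case3 => simp_all

-- B-side fuel sufficiency
theorem pv_suffB : ∀ (f : Nat) (end_ : Int × Int) (stack : List ((Int × Int) × Nat)) (st : PvSt)
    (R C : Nat), pvInv R C st.maze → 2 * pvUnvis R C st.visited + stack.length < f →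
    ∃ r, pvRunB f end_ stack st = some r := by
  intro f
  induction f using Nat.strong_induction_on with
  | _ f IHf =>
  intro end_ stack st R C hInv hcnt
  cases stack with
  | nil => exact ⟨(false, st), by simp [pvRunB]⟩
  | cons frame rest =>
    obtain ⟨pos, i⟩ := frame
    cases f with
    | zero => omega
    | succ f =>
      cases hs : pvScanB st.maze st.visited pos i with
      | none =>
        obtain ⟨r, hr⟩ := IHf f (by omega) end_ rest { st with path := st.path.dropLast } R C hInv
          (by simp at hcnt ⊢; omega)
        exact ⟨r, by simp only [pvRunB, hs]; exact hr⟩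
      | some jc =>
        obtain ⟨j, c⟩ := jc
        have hval := pv_scan_valid hs
        by_cases hend : (c.1 = end_.1 ∧ c.2 = end_.2)
        · exact ⟨(true, { st with path := st.path ++ [c] }), by simp [pvRunB, hs, hend]⟩
        · have hmem := pv_valid_mem hInv hval
          have hmem1 : c ∈ pvCells R C := by simpa using hmem.1
          have hmem2 : c ∉ st.visited := by simpa using hmem.2
          have hlt : pvUnvis R C (PySem.Set.add st.visited c) < pvUnvis R C st.visited :=
            pv_unvis_add_lt R C _ _ hmem1 hmem2
          have hMv : pvUnvis R C (pvMark c st).visited = pvUnvis R C (PySem.Set.add st.visited c) := rfl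
          obtain ⟨r, hr⟩ := IHf f (by omega) end_ ((c, 0) :: (pos, j + 1) :: rest) (pvMark c st) R C
            (pv_inv_setCell hInv _ _ _) (by simp at hcnt ⊢; omega)
          exact ⟨r, by simp only [pvRunB, hs, hend, if_false]; exact hr⟩

-- B-side fuel monotonicity
theorem pv_monoB : ∀ (f : Nat) (k : Nat) (end_ : Int × Int) (stack : List ((Int × Int) × Nat))
    (st : PvSt) (r : Bool × PvSt), pvRunB f end_ stack st = some r →
    pvRunB (f + k) end_ stack st = some r := by
  intro f
  induction f with
  | zero =>
    intro k end_ stack st r h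
    cases stack with
    | nil => simpa [pvRunB] using h
    | cons frame rest =>
      obtain ⟨pos, i⟩ := frame
      simp [pvRunB] at h
  | succ f ih =>
    intro k end_ stack st r h
    cases stack with
    | nil => simpa [pvRunB] using h
    | cons frame rest =>
      obtain ⟨pos, i⟩ := frame
      rw [show f + 1 + k = (f + k) + 1 from by omega]
      cases hs : pvScanB st.maze st.visited pos i with
      | none =>
        simp only [pvRunB, hs] at h ⊢
        exact ih k _ _ _ _ h
      | some jc =>
        obtain ⟨j, c⟩ := jc
        simp only [pvRunB, hs] at h ⊢
        by_cases hc : (c.1 = end_.1 ∧ c.2 = end_.2)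
        · simpa [hc] using h
        · simp only [if_neg hc] at h ⊢
          exact ih k _ _ _ _ h

-- skipping an invalid direction does not change the machine
theorem pv_runB_skip {f : Nat} {end_ pos : Int × Int} {i : Nat} {rest : List ((Int × Int) × Nat)}
    {st : PvSt} (h : pvScanB st.maze st.visited pos i = pvScanB st.maze st.visited pos (i + 1)) :
    pvRunB f end_ ((pos, i) :: rest) st = pvRunB f end_ ((pos, i + 1) :: rest) st := by
  cases f with
  | zero => simp [pvRunB]
  | succ f => simp only [pvRunB, h]

-- the simulation: one recursive A-subtree = a segment of B's machine run
theorem pv_sim : ∀ (fA : Nat) (ds : List (Int × Int)) (i : Nat), pvDirections.drop i = ds →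
    ∀ (pos end_ : Int × Int) (st : PvSt) (r : Bool × PvSt),
    pvTryA fA ds pos end_ st = some r →
    ∀ (rest : List ((Int × Int) × Nat)), ∃ n : Nat, ∀ fB : Nat,
      pvRunB (n + fB) end_ ((pos, i) :: rest) st =
        (if r.1 then some r else pvRunB fB end_ rest r.2) := by
  intro fA
  induction fA using Nat.strong_induction_on with
  | _ fA IHf =>
  intro ds
  induction ds with
  | nil =>
    intro i hdrop pos end_ st r hr rest
    have hnone : pvDirections[i]? = none := by rw [← List.head?_drop, hdrop]; rfl
    have hscan : pvScanB st.maze st.visited pos i = none := by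
      unfold pvScanB; rw [hnone]
    have hrr : r = (false, { st with path := st.path.dropLast }) := by
      simp only [pvTryA] at hr
      exact (Option.some.inj hr).symm
    refine ⟨1, fun fB => ?_⟩
    rw [Nat.add_comm 1 fB]
    simp only [pvRunB, hscan, hrr]
    simp
  | cons d ds' IHds =>
    intro i hdrop pos end_ st r hr rest
    have hdi : pvDirections[i]? = some d := by rw [← List.head?_drop, hdrop]; rfl
    have hdrop' : pvDirections.drop (i + 1) = ds' := by rw [← List.tail_drop, hdrop]; rfl
    cases hval : pvIsValid st.maze (pos.1 + d.1) (pos.2 + d.2) st.visited with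
    | false =>
      have hr' : pvTryA fA ds' pos end_ st = some r := by
        simp only [pvTryA, hval, Bool.false_eq_true, if_false] at hr
        exact hr
      obtain ⟨n, hn⟩ := IHds (i + 1) hdrop' pos end_ st r hr' rest
      refine ⟨n, fun fB => ?_⟩
      have hskip : pvScanB st.maze st.visited pos i = pvScanB st.maze st.visited pos (i + 1) := by
        conv_lhs => rw [pvScanB.eq_def]
        rw [hdi]; simp [hval]
      rw [pv_runB_skip hskip]
      exact hn fB
    | true =>
      cases fA with
      | zero => simp [pvTryA, hval, pvDfsA] at hr
      | succ f =>
        have hscan : pvScanB st.maze st.visited pos i = some (i, (pos.1 + d.1, pos.2 + d.2)) := by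
          unfold pvScanB; rw [hdi]; simp [hval]
        by_cases hend : ((pos.1 + d.1 : Int) = end_.1 ∧ (pos.2 + d.2 : Int) = end_.2)
        · have hdfs : pvDfsA (f + 1) (pos.1 + d.1, pos.2 + d.2) end_ st =
              some (true, { st with path := st.path ++ [(pos.1 + d.1, pos.2 + d.2)] }) := by
            simp only [pvDfsA]
            rw [if_pos hend]
          have hrr : r = (true, { st with path := st.path ++ [(pos.1 + d.1, pos.2 + d.2)] }) := by
            simp only [pvTryA, hval, if_true, hdfs] at hr
            exact (Option.some.inj hr).symm
          refine ⟨1, fun fB => ?_⟩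
          rw [Nat.add_comm 1 fB]
          simp only [pvRunB, hscan]
          rw [if_pos hend, hrr]
          simp
        · have hdfsEq : pvDfsA (f + 1) (pos.1 + d.1, pos.2 + d.2) end_ st =
              pvTryA f pvDirections (pos.1 + d.1, pos.2 + d.2) end_
                (pvMark (pos.1 + d.1, pos.2 + d.2) st) := by
            simp only [pvDfsA]
            rw [if_neg hend]
            rfl
          cases hrc : pvTryA f pvDirections (pos.1 + d.1, pos.2 + d.2) end_
              (pvMark (pos.1 + d.1, pos.2 + d.2) st) with
          | none =>
            rw [hrc] at hdfsEq
            simp only [pvTryA, hval, if_true, hdfsEq] at hr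
            cases hr
          | some rc =>
            rw [hrc] at hdfsEq
            obtain ⟨n1, hn1⟩ := IHf f (by omega) pvDirections 0 rfl (pos.1 + d.1, pos.2 + d.2) end_
              (pvMark (pos.1 + d.1, pos.2 + d.2) st) rc hrc ((pos, i + 1) :: rest)
            obtain ⟨b, stc⟩ := rc
            cases b with
            | true =>
              have hrr : r = (true, stc) := by
                simp only [pvTryA, hval, if_true, hdfsEq] at hr
                exact (Option.some.inj hr).symm
              refine ⟨n1 + 1, fun fB => ?_⟩
              rw [show n1 + 1 + fB = (n1 + fB) + 1 by omega]
              simp only [pvRunB, hscan]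
              rw [if_neg hend]
              have h1 := hn1 fB
              rw [if_pos rfl] at h1
              rw [h1, hrr]
              simp
            | false =>
              have hr' : pvTryA (f + 1) ds' pos end_ stc = some r := by
                simp only [pvTryA, hval, if_true, hdfsEq] at hr
                exact hr
              obtain ⟨n2, hn2⟩ := IHds (i + 1) hdrop' pos end_ stc r hr' rest
              refine ⟨n1 + n2 + 1, fun fB => ?_⟩
              rw [show n1 + n2 + 1 + fB = (n1 + (n2 + fB)) + 1 by omega]
              simp only [pvRunB, hscan]
              rw [if_neg hend]
              have h1 := hn1 (n2 + fB)
              rw [if_neg (by simp)] at h1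
              rw [h1]
              exact hn2 fB

theorem pv_cells_length (R C : Nat) : (pvCells R C).length = R * C := by
  induction R with
  | zero => simp [pvCells]
  | succ R ih =>
    simp only [pvCells, List.range_succ, List.flatMap_append] at ih ⊢
    simp_all [Nat.succ_mul]

theorem pv_unvis_le (R C : Nat) (v : List (Int × Int)) : pvUnvis R C v ≤ R * C := by
  calc pvUnvis R C v ≤ (pvCells R C).length := List.length_filter_le _ _
    _ = R * C := pv_cells_length R C

-- ===== VERDICT (by name: the statement is the Claim_ definition above) =====
theorem dfs_spec : Claim_equal_dfs := by
  unfold Claim_equal_dfs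
  intro AllMaze maze start end_ visited path hDom hPre
  unfold Spec_dfs
  by_cases hse : (start.1 = end_.1 ∧ start.2 = end_.2)
  · have hA : dfs AllMaze maze start end_ visited path = true := by
      unfold dfs
      rw [show maze.length * (maze.headD []).length + 2
            = (maze.length * (maze.headD []).length + 1) + 1 from rfl]
      simp only [pvDfsA]
      rw [if_pos hse]
      rfl
    have hB : dfs_alt AllMaze maze start end_ visited path = true := by
      unfold dfs_alt
      rw [if_pos hse]
    rw [hA, hB]
  · obtain ⟨hrows, hx0, hxR, hy0, hyC⟩ := hPre.resolve_left hse
    have hInv0 : pvInv maze.length (maze.headD []).length maze := ⟨rfl, rfl, hrows⟩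
    have hInv1 : pvInv maze.length (maze.headD []).length
        (pvMark (start.1, start.2) ⟨AllMaze, maze, visited, path⟩).maze :=
      pv_inv_setCell hInv0 _ _ _
    have hu1 : pvUnvis maze.length (maze.headD []).length
        (pvMark (start.1, start.2) ⟨AllMaze, maze, visited, path⟩).visited
          ≤ maze.length * (maze.headD []).length := pv_unvis_le _ _ _
    obtain ⟨r, hrT, hrI, hrU⟩ := pv_suffT (maze.length * (maze.headD []).length + 1)
      pvDirections start end_ (pvMark (start.1, start.2) ⟨AllMaze, maze, visited, path⟩)
      maze.length (maze.headD []).length hInv1 (lt_of_le_of_lt hu1 (by omega))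
    have hA : dfs AllMaze maze start end_ visited path = r.1 := by
      unfold dfs
      rw [show maze.length * (maze.headD []).length + 2
            = (maze.length * (maze.headD []).length + 1) + 1 from rfl]
      simp only [pvDfsA]
      rw [if_neg hse]
      rw [show pvTryA (maze.length * (maze.headD []).length + 1) pvDirections start end_
            ⟨AllMaze ++ [pvSetCell maze start.1 start.2 4], pvSetCell maze start.1 start.2 4,
             PySem.Set.add visited (start.1, start.2), path ++ [(start.1, start.2)]⟩ = some r from hrT]
      rfl
    obtain ⟨n, hn⟩ := pv_sim (maze.length * (maze.headD []).length + 1) pvDirections 0 rfl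
      start end_ (pvMark (start.1, start.2) ⟨AllMaze, maze, visited, path⟩) r hrT []
    obtain ⟨r', hrB⟩ := pv_suffB (2 * (maze.length * (maze.headD []).length) + 4) end_
      [((start.1, start.2), 0)] (pvMark (start.1, start.2) ⟨AllMaze, maze, visited, path⟩)
      maze.length (maze.headD []).length hInv1
      (by simp only [List.length_cons, List.length_nil]; omega)
    have hmono := pv_monoB (2 * (maze.length * (maze.headD []).length) + 4) n end_
      [((start.1, start.2), 0)] (pvMark (start.1, start.2) ⟨AllMaze, maze, visited, path⟩) r' hrB
    have hsim := hn (2 * (maze.length * (maze.headD []).length) + 4)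
    rw [Nat.add_comm n _] at hsim
    rw [show ((start, 0) :: [] : List ((Int × Int) × Nat)) = [((start.1, start.2), 0)] from rfl]
      at hsim
    rw [hmono] at hsim
    have hfst : r'.1 = r.1 := by
      cases hb : r.1 with
      | true =>
        rw [hb, if_pos rfl] at hsim
        rw [Option.some.inj hsim, hb]
      | false =>
        rw [hb] at hsim
        simp only [Bool.false_eq_true, if_false, pvRunB] at hsim
        rw [Option.some.inj hsim]
    have hB : dfs_alt AllMaze maze start end_ visited path = r'.1 := by
      unfold dfs_alt
      rw [if_neg hse]
      show (Option.map Prod.fst (pvRunB (2 * (maze.length * (maze.headD []).length) + 4) end_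
        [((start.1, start.2), 0)]
        (pvMark (start.1, start.2) ⟨AllMaze, maze, visited, path⟩))).getD false = r'.1
      rw [hrB]
      rfl
    rw [hA, hB, hfst]
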